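-- pv_equiv track=rewrite | github.com/midnight-sun-ctf/challenges2018 | qualifiers/isoar/docker/util.py | calculate_hints
-- ===== SOURCE A (Python) =====
-- import hashlib, string
--
-- def calculate_hints(wordlist, word):
--     out = []
--     wordcount = len(wordlist)
--     wordlen = len(word)
--
--     def numlc(s):
--         return len([c for c in s if c in string.ascii_lowercase])
--     def numuc(s):
--         return len([c for c in s if c in string.ascii_uppercase])
--     def numdigits(s):
--         return len([c for c in s if c in string.digits])
--
--     out += ["The given password has {} characters".format(wordlen)]
--     out += ["The given password has {} lowercase characters".format(numlc(word))]
--     out += ["The given password has {} uppercase characters".format(numuc(word))]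
--     out += ["The given password has {} digits".format(numdigits(word))]
--
--     out += ["The length of the given password equals {} out of {} known passwords".format(len([x for x in wordlist if len(x) == wordlen]), wordcount)]
--     out += ["The given password is longer than {} out of {} known passwords".format(len([x for x in wordlist if len(x) < wordlen]), wordcount)]
--     out += ["The given password is shorter than {} out of {} known passwords".format(len([x for x in wordlist if len(x) > wordlen]), wordcount)]
--
--     ranks = ["first", "second", "third", "fourth", "fifth"]
--
--     for i in range(len(ranks)):
--         if wordlen > i:
--             out += ["The {} character of the given password occurs in {} out of {} known passwords".format(ranks[i], len([x for x in wordlist if word[i] in x]), wordcount)]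
--
--     out += ["The last character of the given password occurs in {} out of {} known passwords".format(len([x for x in wordlist if word[-1] in x]), wordcount)]
--     out += ["The given password occurs as part of {} out of {} known passwords".format(len([x for x in wordlist if word in x]), wordcount)]
--     out += ["{} out of {} known passwords are suffixed with the given password".format(len([x for x in wordlist if x.endswith(word)]), wordcount)]
--     out += ["The given password has the same amount of lowercase characters as {} out of {} known passwords".format(len([x for x in wordlist if numlc(word) == numlc(x)]), wordcount)]
--     out += ["The given password has the same amount of uppercase characters as {} out of {} known passwords".format(len([x for x in wordlist if numuc(word) == numuc(x)]), wordcount)]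
--     out += ["The given password has the same amount of digits as {} out of {} known passwords".format(len([x for x in wordlist if numdigits(word) == numdigits(x)]), wordcount)]
--
--     return out
-- ===== SOURCE B (Python) =====
-- import string
--
-- def calculate_hints(wordlist, word):
--     n = len(word)
--
--     def cls_counts(s):
--         lc = uc = dg = 0
--         for c in s:
--             lc += c in string.ascii_lowercase
--             uc += c in string.ascii_uppercase
--             dg += c in string.digits
--         return lc, uc, dg
--
--     wlc, wuc, wdg = cls_counts(word)
--     last = word[-1]
--     probes = list(word[:5])
--     cnt = len(wordlist)
--
--     eq = lt = gt = lastc = sub = suf = slc = suc = sdg = 0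
--     pos = [0] * len(probes)
--     for x in wordlist:
--         xl = len(x)
--         eq += xl == n
--         lt += xl < n
--         gt += xl > n
--         pos = [c + (p in x) for p, c in zip(probes, pos)]
--         lastc += last in x
--         sub += word in x
--         suf += x.endswith(word)
--         xlc, xuc, xdg = cls_counts(x)
--         slc += wlc == xlc
--         suc += wuc == xuc
--         sdg += wdg == xdg
--
--     ranks = ["first", "second", "third", "fourth", "fifth"]
--     out = [
--         "The given password has {} characters".format(n),
--         "The given password has {} lowercase characters".format(wlc),
--         "The given password has {} uppercase characters".format(wuc),
--         "The given password has {} digits".format(wdg),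
--         "The length of the given password equals {} out of {} known passwords".format(eq, cnt),
--         "The given password is longer than {} out of {} known passwords".format(lt, cnt),
--         "The given password is shorter than {} out of {} known passwords".format(gt, cnt),
--     ]
--     out += ["The {} character of the given password occurs in {} out of {} known passwords".format(r, c, cnt)
--             for r, c in zip(ranks, pos)]
--     out += [
--         "The last character of the given password occurs in {} out of {} known passwords".format(lastc, cnt),
--         "The given password occurs as part of {} out of {} known passwords".format(sub, cnt),
--         "{} out of {} known passwords are suffixed with the given password".format(suf, cnt),
--         "The given password has the same amount of lowercase characters as {} out of {} known passwords".format(slc, cnt),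
--         "The given password has the same amount of uppercase characters as {} out of {} known passwords".format(suc, cnt),
--         "The given password has the same amount of digits as {} out of {} known passwords".format(sdg, cnt),
--     ]
--     return out
-- ===== Notes on version B (the rewrite author's own statement) =====
-- stated objective: faster
-- what changed: A makes 13 independent passes over the wordlist (one list comprehension per hint line) and re-computes numlc/numuc/numdigits of the fixed password once per wordlist element inside three of those comprehensions; B computes the password's class counts once, then accumulates all thirteen counters (length eq/lt/gt, per-position and last-char occurrence, substring, suffix, same-class-count) in a single fused pass over the wordlist and only then renders the hint strings.
import Mathlib
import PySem

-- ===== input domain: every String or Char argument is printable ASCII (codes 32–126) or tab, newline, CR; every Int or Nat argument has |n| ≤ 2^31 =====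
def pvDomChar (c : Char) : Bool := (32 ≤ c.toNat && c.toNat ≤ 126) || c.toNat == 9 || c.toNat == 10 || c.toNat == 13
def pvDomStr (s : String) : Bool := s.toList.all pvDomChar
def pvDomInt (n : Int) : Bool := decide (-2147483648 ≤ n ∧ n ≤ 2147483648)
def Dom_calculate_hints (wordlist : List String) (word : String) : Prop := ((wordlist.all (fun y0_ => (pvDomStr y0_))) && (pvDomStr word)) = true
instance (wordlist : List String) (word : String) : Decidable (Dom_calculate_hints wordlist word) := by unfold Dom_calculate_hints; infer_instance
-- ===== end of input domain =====

-- B replaces A's 13 independent passes over the wordlist (one per hint line, three of which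
-- recompute the password's class counts for every element) by a single fused pass that
-- accumulates all counters, then renders the lines; return value proved equal on Pre_.

-- shared module constants (string.ascii_lowercase / ascii_uppercase / digits) and int formatting
def pyLower : List Char := "abcdefghijklmnopqrstuvwxyz".toList
def pyUpper : List Char := "ABCDEFGHIJKLMNOPQRSTUVWXYZ".toList
def pyDigits : List Char := "0123456789".toList
def pyFmt (n : Nat) : String := PySem.Int.toStr (n : Int)   -- "{}".format(<int>)

-- ===== PORT A =====
-- numlc / numuc / numdigits: len([c for c in s if c in <class>]); 'c in <str>' is the
-- 1-character substring test, ported exactly as PySem.Chars.isIn [c] <class chars>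
def pyNumlc (s : String) : Nat := (s.toList.filter (fun c => PySem.Chars.isIn [c] pyLower)).length
def pyNumuc (s : String) : Nat := (s.toList.filter (fun c => PySem.Chars.isIn [c] pyUpper)).length
def pyNumdigits (s : String) : Nat := (s.toList.filter (fun c => PySem.Chars.isIn [c] pyDigits)).length

def calculate_hints (wordlist : List String) (word : String) : List String :=
  let out : List String := []
  let wordcount := wordlist.length
  let wordlen := word.toList.length
  let out := out ++ ["The given password has " ++ pyFmt wordlen ++ " characters"]
  let out := out ++ ["The given password has " ++ pyFmt (pyNumlc word) ++ " lowercase characters"]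
  let out := out ++ ["The given password has " ++ pyFmt (pyNumuc word) ++ " uppercase characters"]
  let out := out ++ ["The given password has " ++ pyFmt (pyNumdigits word) ++ " digits"]
  let out := out ++ ["The length of the given password equals " ++ pyFmt ((wordlist.filter (fun x => x.toList.length == wordlen)).length) ++ " out of " ++ pyFmt wordcount ++ " known passwords"]
  let out := out ++ ["The given password is longer than " ++ pyFmt ((wordlist.filter (fun x => decide (x.toList.length < wordlen))).length) ++ " out of " ++ pyFmt wordcount ++ " known passwords"]
  let out := out ++ ["The given password is shorter than " ++ pyFmt ((wordlist.filter (fun x => decide (x.toList.length > wordlen))).length) ++ " out of " ++ pyFmt wordcount ++ " known passwords"]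
  let ranks : List String := ["first", "second", "third", "fourth", "fifth"]
  -- for i in range(len(ranks)): if wordlen > i: …   (word[i] is in range because of the guard)
  let out := (List.range ranks.length).foldl (fun a i =>
    if wordlen > i then
      a ++ ["The " ++ ranks.getD i "" ++ " character of the given password occurs in " ++ pyFmt ((wordlist.filter (fun x => PySem.Chars.isIn [word.toList.getD i ' '] x.toList)).length) ++ " out of " ++ pyFmt wordcount ++ " known passwords"]
    else a) out
  match PySem.List.pyGet? word.toList (-1) with   -- word[-1]
  | none => out   -- Python raises IndexError here (word = ""); excluded by Pre_
  | some lastc =>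
    let out := out ++ ["The last character of the given password occurs in " ++ pyFmt ((wordlist.filter (fun x => PySem.Chars.isIn [lastc] x.toList)).length) ++ " out of " ++ pyFmt wordcount ++ " known passwords"]
    let out := out ++ ["The given password occurs as part of " ++ pyFmt ((wordlist.filter (fun x => PySem.Str.isIn word x)).length) ++ " out of " ++ pyFmt wordcount ++ " known passwords"]
    let out := out ++ [pyFmt ((wordlist.filter (fun x => PySem.Str.endswith x word)).length) ++ " out of " ++ pyFmt wordcount ++ " known passwords are suffixed with the given password"]
    let out := out ++ ["The given password has the same amount of lowercase characters as " ++ pyFmt ((wordlist.filter (fun x => pyNumlc word == pyNumlc x)).length) ++ " out of " ++ pyFmt wordcount ++ " known passwords"]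
    let out := out ++ ["The given password has the same amount of uppercase characters as " ++ pyFmt ((wordlist.filter (fun x => pyNumuc word == pyNumuc x)).length) ++ " out of " ++ pyFmt wordcount ++ " known passwords"]
    let out := out ++ ["The given password has the same amount of digits as " ++ pyFmt ((wordlist.filter (fun x => pyNumdigits word == pyNumdigits x)).length) ++ " out of " ++ pyFmt wordcount ++ " known passwords"]
    out

-- ===== PORT B =====
-- cls_counts: one loop over s, the three 'n += (c in <class>)' increments fused
def clsStep (t : Nat × Nat × Nat) (c : Char) : Nat × Nat × Nat :=
  (t.1 + (if PySem.Chars.isIn [c] pyLower then 1 else 0),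
   t.2.1 + (if PySem.Chars.isIn [c] pyUpper then 1 else 0),
   t.2.2 + (if PySem.Chars.isIn [c] pyDigits then 1 else 0))

def clsCounts (s : String) : Nat × Nat × Nat := s.toList.foldl clsStep (0, 0, 0)

structure HState where
  eqc : Nat
  ltc : Nat
  gtc : Nat
  pos : List Nat
  lastcnt : Nat
  subcnt : Nat
  sufcnt : Nat
  slc : Nat
  suc : Nat
  sdg : Nat
deriving Repr, DecidableEq

-- the body of B's single 'for x in wordlist' loop
def hstep (n : Nat) (probes : List Char) (lastch : Char) (word : String) (wlc wuc wdg : Nat)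
    (st : HState) (x : String) : HState :=
  let xl := x.toList.length
  let xc := clsCounts x
  { eqc := st.eqc + (if xl == n then 1 else 0),
    ltc := st.ltc + (if decide (xl < n) then 1 else 0),
    gtc := st.gtc + (if decide (xl > n) then 1 else 0),
    pos := List.zipWith (fun p c => c + (if PySem.Chars.isIn [p] x.toList then 1 else 0)) probes st.pos,
    lastcnt := st.lastcnt + (if PySem.Chars.isIn [lastch] x.toList then 1 else 0),
    subcnt := st.subcnt + (if PySem.Str.isIn word x then 1 else 0),
    sufcnt := st.sufcnt + (if PySem.Str.endswith x word then 1 else 0),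
    slc := st.slc + (if wlc == xc.1 then 1 else 0),
    suc := st.suc + (if wuc == xc.2.1 then 1 else 0),
    sdg := st.sdg + (if wdg == xc.2.2 then 1 else 0) }

def calculate_hints_alt (wordlist : List String) (word : String) : List String :=
  let n := word.toList.length
  let wc := clsCounts word
  match PySem.List.pyGet? word.toList (-1) with   -- last = word[-1]
  | none => []   -- Python raises IndexError here (word = ""); excluded by Pre_
  | some lastch =>
    let probes := PySem.List.slice word.toList none (some 5)   -- list(word[:5])
    let cnt := wordlist.length
    let st := wordlist.foldl (hstep n probes lastch word wc.1 wc.2.1 wc.2.2)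
      ⟨0, 0, 0, List.replicate probes.length 0, 0, 0, 0, 0, 0, 0⟩
    let ranks : List String := ["first", "second", "third", "fourth", "fifth"]
    (["The given password has " ++ pyFmt n ++ " characters",
      "The given password has " ++ pyFmt wc.1 ++ " lowercase characters",
      "The given password has " ++ pyFmt wc.2.1 ++ " uppercase characters",
      "The given password has " ++ pyFmt wc.2.2 ++ " digits",
      "The length of the given password equals " ++ pyFmt st.eqc ++ " out of " ++ pyFmt cnt ++ " known passwords",
      "The given password is longer than " ++ pyFmt st.ltc ++ " out of " ++ pyFmt cnt ++ " known passwords",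
      "The given password is shorter than " ++ pyFmt st.gtc ++ " out of " ++ pyFmt cnt ++ " known passwords"]
     ++ List.zipWith (fun (r : String) (c : Nat) =>
          "The " ++ r ++ " character of the given password occurs in " ++ pyFmt c ++ " out of " ++ pyFmt cnt ++ " known passwords") ranks st.pos
     ++ ["The last character of the given password occurs in " ++ pyFmt st.lastcnt ++ " out of " ++ pyFmt cnt ++ " known passwords",
         "The given password occurs as part of " ++ pyFmt st.subcnt ++ " out of " ++ pyFmt cnt ++ " known passwords",
         pyFmt st.sufcnt ++ " out of " ++ pyFmt cnt ++ " known passwords are suffixed with the given password",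
         "The given password has the same amount of lowercase characters as " ++ pyFmt st.slc ++ " out of " ++ pyFmt cnt ++ " known passwords",
         "The given password has the same amount of uppercase characters as " ++ pyFmt st.suc ++ " out of " ++ pyFmt cnt ++ " known passwords",
         "The given password has the same amount of digits as " ++ pyFmt st.sdg ++ " out of " ++ pyFmt cnt ++ " known passwords"])

-- ===== PRECONDITION & SPEC =====
-- Pre_ excludes only the empty password: there A raises IndexError at word[-1] whenever the
-- wordlist is non-empty (and when the wordlist is also empty, A's comprehensions never evaluate
-- word[-1] and it returns all-zero lines, while B's up-front last = word[-1] naturally raises).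
def Pre_calculate_hints (wordlist : List String) (word : String) : Prop := word ≠ ""
instance (wordlist : List String) (word : String) : Decidable (Pre_calculate_hints wordlist word) := by unfold Pre_calculate_hints; infer_instance
def pvWitness_calculate_hints : List String × String := (["ab", "cD", "x9ab"], "ab")

def Spec_calculate_hints (wordlist : List String) (word : String) (out : List String) : Prop := out = calculate_hints_alt wordlist word
instance (wordlist : List String) (word : String) (out : List String) : Decidable (Spec_calculate_hints wordlist word out) := by unfold Spec_calculate_hints; infer_instance

-- ===== CLAIM (what is proved, stated in full; the proofs are below) =====
def Claim_equal_calculate_hints : Prop := ∀ (wordlist : List String) (word : String), Dom_calculate_hints wordlist word → Pre_calculate_hints wordlist word → Spec_calculate_hints wordlist word (calculate_hints wordlist word)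

-- ===== LEMMAS AND PROOFS =====

theorem zipWith_zipWith_self {α β : Type} (f g h : α → β → β)
    (hfg : ∀ p c, f p (g p c) = h p c) :
    ∀ (ps : List α) (cs : List β),
      List.zipWith f ps (List.zipWith g ps cs) = List.zipWith h ps cs := by
  intro ps
  induction ps with
  | nil => intro cs; simp
  | cons p ps ih =>
    intro cs
    cases cs with
    | nil => simp
    | cons c cs => simp [hfg, ih]

theorem zipWith_snd_self {α : Type} (ps : List α) :
    ∀ (cs : List Nat), cs.length = ps.length →
      List.zipWith (fun (_ : α) (c : Nat) => c) ps cs = cs := by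
  induction ps with
  | nil => intro cs h; simp_all [List.length_eq_zero_iff]
  | cons p ps ih =>
    intro cs h
    cases cs with
    | nil => simp at h
    | cons c cs => simp_all

theorem zipWith_replicate_right {α β γ : Type} (f : α → β → γ) (b : β) :
    ∀ (ps : List α), List.zipWith f ps (List.replicate ps.length b) = ps.map (fun p => f p b) := by
  intro ps
  induction ps with
  | nil => simp
  | cons p ps ih => simp [List.replicate_succ, ih]

theorem zipWith_take_right {α β γ : Type} (f : α → β → γ) :
    ∀ (rs : List α) (cs : List β) (m : Nat), rs.length ≤ m →
      List.zipWith f rs (cs.take m) = List.zipWith f rs cs := by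
  intro rs
  induction rs with
  | nil => simp
  | cons r rs ih =>
    intro cs m h
    cases cs with
    | nil => simp
    | cons c cs =>
      cases m with
      | zero => simp at h
      | succ m => simp [ih cs m (by simpa using h)]

theorem clsCounts_foldl (cs : List Char) :
    ∀ (a b c : Nat),
      cs.foldl clsStep (a, b, c) =
        (a + cs.countP (fun c => PySem.Chars.isIn [c] pyLower),
         b + cs.countP (fun c => PySem.Chars.isIn [c] pyUpper),
         c + cs.countP (fun c => PySem.Chars.isIn [c] pyDigits)) := by
  induction cs with
  | nil => simp
  | cons c cs ih =>
    intro a b d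
    rw [List.foldl_cons]
    show cs.foldl clsStep (clsStep (a, b, d) c) = _
    rw [clsStep, ih]
    simp only [List.countP_cons]
    refine Prod.ext ?_ (Prod.ext ?_ ?_) <;> simp <;> omega

theorem clsCounts_eq (s : String) :
    clsCounts s = (pyNumlc s, pyNumuc s, pyNumdigits s) := by
  simp [clsCounts, pyNumlc, pyNumuc, pyNumdigits, clsCounts_foldl, List.countP_eq_length_filter]

theorem hstep_foldl (n : Nat) (probes : List Char) (lastch : Char) (word : String)
    (wlc wuc wdg : Nat) (l : List String) :
    ∀ (st : HState), st.pos.length = probes.length →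
      l.foldl (hstep n probes lastch word wlc wuc wdg) st =
        { eqc := st.eqc + l.countP (fun x => x.toList.length == n),
          ltc := st.ltc + l.countP (fun x => decide (x.toList.length < n)),
          gtc := st.gtc + l.countP (fun x => decide (x.toList.length > n)),
          pos := List.zipWith (fun p c => c + l.countP (fun x => PySem.Chars.isIn [p] x.toList)) probes st.pos,
          lastcnt := st.lastcnt + l.countP (fun x => PySem.Chars.isIn [lastch] x.toList),
          subcnt := st.subcnt + l.countP (fun x => PySem.Str.isIn word x),
          sufcnt := st.sufcnt + l.countP (fun x => PySem.Str.endswith x word),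
          slc := st.slc + l.countP (fun x => wlc == (clsCounts x).1),
          suc := st.suc + l.countP (fun x => wuc == (clsCounts x).2.1),
          sdg := st.sdg + l.countP (fun x => wdg == (clsCounts x).2.2) } := by
  induction l with
  | nil =>
    intro st h
    simp only [List.foldl_nil, List.countP_nil, Nat.add_zero]
    cases st with
    | mk eqc ltc gtc pos lastcnt subcnt sufcnt slc suc sdg =>
      simp only [HState.mk.injEq, true_and, and_true]
      exact (zipWith_snd_self probes pos (by simpa using h)).symm
  | cons x l ih =>
    intro st h
    rw [List.foldl_cons]
    rw [ih (hstep n probes lastch word wlc wuc wdg st x)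
          (by simp only [hstep, List.length_zipWith]; omega)]
    simp only [hstep, HState.mk.injEq, List.countP_cons]
    refine ⟨by omega, by omega, by omega, ?_, by omega, by omega, by omega, by omega, by omega, by omega⟩
    rw [zipWith_zipWith_self
          (fun p c => c + l.countP (fun x => PySem.Chars.isIn [p] x.toList))
          (fun p c => c + (if PySem.Chars.isIn [p] x.toList then 1 else 0))
          (fun p c => c + (l.countP (fun x => PySem.Chars.isIn [p] x.toList) + if PySem.Chars.isIn [p] x.toList then 1 else 0))
          (by intro p c; dsimp only; omega)]

theorem rangeFold_zip (mk : String → Char → String) :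
    ∀ (rks : List String) (cs : List Char) (k : Nat) (acc : List String),
      (List.range' k rks.length).foldl (fun a i =>
          if cs.length > i then a ++ [mk (rks.getD (i - k) "") (cs.getD i ' ')] else a) acc
        = acc ++ List.zipWith mk rks (cs.drop k) := by
  intro rks
  induction rks with
  | nil => intro cs k acc; simp
  | cons r rs ih =>
    intro cs k acc
    rw [List.length_cons, List.range'_succ, List.foldl_cons]
    have hcongr : (List.range' (k + 1) rs.length).foldl (fun a i =>
          if cs.length > i then a ++ [mk ((r :: rs).getD (i - k) "") (cs.getD i ' ')] else a)
          (if cs.length > k then acc ++ [mk ((r :: rs).getD (k - k) "") (cs.getD k ' ')] else acc)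
        = (List.range' (k + 1) rs.length).foldl (fun a i =>
          if cs.length > i then a ++ [mk (rs.getD (i - (k + 1)) "") (cs.getD i ' ')] else a)
          (if cs.length > k then acc ++ [mk ((r :: rs).getD (k - k) "") (cs.getD k ' ')] else acc) := by
      apply PySem.List.foldl_congr_mem
      intro a i hi
      have hk1 : k + 1 ≤ i := (List.mem_range'_1.mp hi).1
      have : i - k = (i - (k + 1)) + 1 := by omega
      rw [this]
      simp
    rw [hcongr, ih cs (k + 1)]
    by_cases hk : k < cs.length
    · rw [List.drop_eq_getElem_cons hk]
      simp only [List.zipWith_cons_cons]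
      rw [if_pos hk]
      simp [List.getElem?_eq_getElem hk, List.getD, List.append_assoc]
    · have h1 : cs.drop k = [] := List.drop_eq_nil_of_le (by omega)
      have h2 : cs.drop (k + 1) = [] := List.drop_eq_nil_of_le (by omega)
      rw [if_neg (by omega), h1, h2]
      simp

theorem rangeFold_zip_zero (mk : String → Char → String) (rks : List String) (cs : List Char) (acc : List String) :
    (List.range rks.length).foldl (fun a i =>
        if cs.length > i then a ++ [mk (rks.getD i "") (cs.getD i ' ')] else a) acc
      = acc ++ List.zipWith mk rks cs := by
  have h := rangeFold_zip mk rks cs 0 acc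
  simpa [List.range_eq_range'] using h

-- ===== VERDICT (by name: the statement is the Claim_ definition above) =====
theorem calculate_hints_spec : Claim_equal_calculate_hints := by
  intro wordlist word hdom hpre
  unfold Spec_calculate_hints calculate_hints calculate_hints_alt
  have hne : word.toList ≠ [] := by simpa [String.toList_eq_nil_iff] using hpre
  obtain ⟨lastch, hL⟩ : ∃ c, word.toList.getLast? = some c := by
    cases h : word.toList.getLast? with
    | none => exact absurd (List.getLast?_eq_none_iff.mp h) hne
    | some c => exact ⟨c, rfl⟩
  dsimp only
  rw [PySem.List.pyGet?_neg_one, hL]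
  dsimp only
  have hfold := hstep_foldl (word.toList.length) (PySem.List.slice word.toList none (some 5)) lastch word
      (clsCounts word).1 (clsCounts word).2.1 (clsCounts word).2.2 wordlist
      ⟨0, 0, 0, List.replicate (PySem.List.slice word.toList none (some 5)).length 0, 0, 0, 0, 0, 0, 0⟩ (by simp)
  rw [hfold]
  rw [rangeFold_zip_zero (fun r c =>
        "The " ++ r ++ " character of the given password occurs in " ++ pyFmt ((wordlist.filter (fun x => PySem.Chars.isIn [c] x.toList)).length) ++ " out of " ++ pyFmt wordlist.length ++ " known passwords")]
  simp [clsCounts_eq, List.countP_eq_length_filter, PySem.List.slice_to, List.append_assoc]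
  have h5 : List.replicate (min 5 word.length) (0 : Nat) = List.replicate (List.take 5 word.toList).length 0 := by
    simp [List.length_take]
  rw [h5, zipWith_replicate_right, List.zipWith_map_right,
      zipWith_take_right _ ["first", "second", "third", "fourth", "fifth"] word.toList 5 (by simp)]
  simp
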